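-- pv_equiv track=rewrite | github.com/pypi-data/pypi-mirror-289 | packages/ascii-flix/ascii_flix-0.24.tar.gz/ascii_flix-0.24/utils/image_utils.py | img_to_ascii
-- ===== SOURCE A (Python) =====
-- THRESHOLD=[0,32,64,96,128,160,191,224]
--
-- CHARACTER=['.',',',':',';','=','+','*','#']
--
-- CHARACTER_FILLED = [' ', '░', '▒', '▓', '█', '█', '█', '█']
--
-- def pixel_to_char(pixel_intensity,mode):
--     index=-1
--     for i in range(len(THRESHOLD)):
--         if pixel_intensity>=THRESHOLD[i]:
--             index+=1
--         else:
--             break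
--     if index==-1:
--         return ""
--     else:
--         if mode=="normal":
--             return CHARACTER[index]
--         else:
--              return CHARACTER_FILLED[index]
--
-- def img_to_ascii(image,mode):
--     output=""
--     for row in image:
--         for pixel_intensity in row:
--             output+=pixel_to_char(pixel_intensity,mode)
--         output+="\n"
--
--     output_list=list(output.split("\n"))
--     return output_list
-- ===== SOURCE B (Python) =====
-- THRESHOLD=[0,32,64,96,128,160,191,224]
--
-- CHARACTER=['.',',',':',';','=','+','*','#']
--
-- CHARACTER_FILLED = [' ', '░', '▒', '▓', '█', '█', '█', '█']
--
-- def _char_for(pixel_intensity, mode):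
--     # binary search: lo ends as the number of thresholds <= pixel_intensity
--     lo, hi = 0, len(THRESHOLD)
--     while lo < hi:
--         mid = (lo + hi) // 2
--         if pixel_intensity >= THRESHOLD[mid]:
--             lo = mid + 1
--         else:
--             hi = mid
--     if lo == 0:
--         return ""
--     return CHARACTER[lo - 1] if mode == "normal" else CHARACTER_FILLED[lo - 1]
--
-- def img_to_ascii(image, mode):
--     lines = [''.join(_char_for(p, mode) for p in row) for row in image]
--     lines.append('')
--     return lines
-- ===== Notes on version B (the rewrite author's own statement) =====
-- stated objective: alternative
-- what changed: The threshold lookup becomes a hand-written binary search over THRESHOLD instead of A's count-up scan with break, and output lines are built row-by-row with join and a final '' appended instead of concatenating everything into one string and splitting it on newlines.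
import Mathlib
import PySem

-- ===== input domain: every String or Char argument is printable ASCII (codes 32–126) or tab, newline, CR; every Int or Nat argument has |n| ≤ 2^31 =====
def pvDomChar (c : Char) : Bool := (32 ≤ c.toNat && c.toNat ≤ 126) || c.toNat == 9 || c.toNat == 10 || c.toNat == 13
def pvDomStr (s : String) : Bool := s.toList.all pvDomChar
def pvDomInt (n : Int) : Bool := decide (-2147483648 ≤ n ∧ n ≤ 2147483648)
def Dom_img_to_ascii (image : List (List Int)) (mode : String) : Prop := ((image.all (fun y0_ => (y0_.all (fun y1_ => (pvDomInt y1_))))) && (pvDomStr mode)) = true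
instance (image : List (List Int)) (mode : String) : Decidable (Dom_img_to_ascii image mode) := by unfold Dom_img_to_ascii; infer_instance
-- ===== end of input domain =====

-- B replaces A's count-up threshold scan by a hand-written binary search and builds the
-- result line-by-line with join instead of concatenate-then-split (objective: alternative).

-- ===== PORT A =====
def THRESHOLD : List Int := [0, 32, 64, 96, 128, 160, 191, 224]
def CHARACTER : List (List Char) := [['.'], [','], [':'], [';'], ['='], ['+'], ['*'], ['#']]
def CHARACTER_FILLED : List (List Char) := [[' '], ['░'], ['▒'], ['▓'], ['█'], ['█'], ['█'], ['█']]

-- the 'for i in range(len(THRESHOLD)): if p >= THRESHOLD[i]: index += 1 else: break' loop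
def pixelLoop (ts : List Int) (p : Int) (index : Int) : Int :=
  match ts with
  | [] => index
  | t :: rest => if p ≥ t then pixelLoop rest p (index + 1) else index

-- returns the (0- or 1-char) string as a List Char
def pixel_to_char (p : Int) (mode : String) : List Char :=
  let index := pixelLoop THRESHOLD p (-1)
  if index = -1 then []
  else if mode = "normal" then PySem.List.pyGetD CHARACTER index []
  else PySem.List.pyGetD CHARACTER_FILLED index []

def img_to_ascii (image : List (List Int)) (mode : String) : List String :=
  let output : List Char :=
    image.foldl (fun out row =>
      (row.foldl (fun o p => o ++ pixel_to_char p mode) out) ++ ['\n']) []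
  (PySem.Chars.splitOn output ['\n']).map String.ofList

-- ===== PORT B =====  (shares the three module-level constant tables above)
-- the 'while lo < hi' binary search of Source B, fuel-bounded (8 ≥ number of iterations)
def bsLoop (p : Int) : Nat → Nat → Nat → Nat
  | 0, lo, _ => lo
  | fuel + 1, lo, hi =>
    if lo < hi then
      let mid := (lo + hi) / 2
      if p ≥ PySem.List.pyGetD THRESHOLD (mid : Int) 0 then bsLoop p fuel (mid + 1) hi
      else bsLoop p fuel lo mid
    else lo

def charFor (p : Int) (mode : String) : List Char :=
  let lo := bsLoop p 8 0 8
  if lo = 0 then []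
  else if mode = "normal" then PySem.List.pyGetD CHARACTER ((lo : Int) - 1) []
  else PySem.List.pyGetD CHARACTER_FILLED ((lo : Int) - 1) []

def img_to_ascii_alt (image : List (List Int)) (mode : String) : List String :=
  let lines := image.map (fun row =>
    String.ofList (PySem.Chars.join [] (row.map (fun p => charFor p mode))))
  lines ++ [""]

-- ===== PRECONDITION & SPEC =====
def Spec_img_to_ascii (image : List (List Int)) (mode : String) (out : List String) : Prop := out = img_to_ascii_alt image mode
instance (image : List (List Int)) (mode : String) (out : List String) : Decidable (Spec_img_to_ascii image mode out) := by unfold Spec_img_to_ascii; infer_instance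

-- ===== CLAIM (what is proved, stated in full; the proofs are below) =====
def Claim_equal_img_to_ascii : Prop := ∀ (image : List (List Int)) (mode : String), Dom_img_to_ascii image mode → Spec_img_to_ascii image mode (img_to_ascii image mode)

-- ===== LEMMAS AND PROOFS =====

lemma pchar_eq (p : Int) (mode : String) : pixel_to_char p mode = charFor p mode := by
  rcases (by omega : p < 0 ∨ (0 ≤ p ∧ p < 32) ∨ (32 ≤ p ∧ p < 64) ∨ (64 ≤ p ∧ p < 96) ∨ (96 ≤ p ∧ p < 128) ∨ (128 ≤ p ∧ p < 160) ∨ (160 ≤ p ∧ p < 191) ∨ (191 ≤ p ∧ p < 224) ∨ 224 ≤ p) with h|h|h|h|h|h|h|h|h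
  · have c0 : ¬ ((0:Int) ≤ p) := by omega
    have c1 : ¬ ((32:Int) ≤ p) := by omega
    have c2 : ¬ ((64:Int) ≤ p) := by omega
    have c3 : ¬ ((96:Int) ≤ p) := by omega
    have c4 : ¬ ((128:Int) ≤ p) := by omega
    have c5 : ¬ ((160:Int) ≤ p) := by omega
    have c6 : ¬ ((191:Int) ≤ p) := by omega
    have c7 : ¬ ((224:Int) ≤ p) := by omega
    simp [pixel_to_char, charFor, pixelLoop, bsLoop, THRESHOLD, CHARACTER, CHARACTER_FILLED, PySem.List.pyGetD, c0, c1, c2, c3, c4, c5, c6, c7]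
  · have c0 : (0:Int) ≤ p := by omega
    have c1 : ¬ ((32:Int) ≤ p) := by omega
    have c2 : ¬ ((64:Int) ≤ p) := by omega
    have c3 : ¬ ((96:Int) ≤ p) := by omega
    have c4 : ¬ ((128:Int) ≤ p) := by omega
    have c5 : ¬ ((160:Int) ≤ p) := by omega
    have c6 : ¬ ((191:Int) ≤ p) := by omega
    have c7 : ¬ ((224:Int) ≤ p) := by omega
    simp [pixel_to_char, charFor, pixelLoop, bsLoop, THRESHOLD, CHARACTER, CHARACTER_FILLED, PySem.List.pyGetD, c0, c1, c2, c3, c4, c5, c6, c7]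
  · have c0 : (0:Int) ≤ p := by omega
    have c1 : (32:Int) ≤ p := by omega
    have c2 : ¬ ((64:Int) ≤ p) := by omega
    have c3 : ¬ ((96:Int) ≤ p) := by omega
    have c4 : ¬ ((128:Int) ≤ p) := by omega
    have c5 : ¬ ((160:Int) ≤ p) := by omega
    have c6 : ¬ ((191:Int) ≤ p) := by omega
    have c7 : ¬ ((224:Int) ≤ p) := by omega
    simp [pixel_to_char, charFor, pixelLoop, bsLoop, THRESHOLD, CHARACTER, CHARACTER_FILLED, PySem.List.pyGetD, c0, c1, c2, c3, c4, c5, c6, c7]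
  · have c0 : (0:Int) ≤ p := by omega
    have c1 : (32:Int) ≤ p := by omega
    have c2 : (64:Int) ≤ p := by omega
    have c3 : ¬ ((96:Int) ≤ p) := by omega
    have c4 : ¬ ((128:Int) ≤ p) := by omega
    have c5 : ¬ ((160:Int) ≤ p) := by omega
    have c6 : ¬ ((191:Int) ≤ p) := by omega
    have c7 : ¬ ((224:Int) ≤ p) := by omega
    simp [pixel_to_char, charFor, pixelLoop, bsLoop, THRESHOLD, CHARACTER, CHARACTER_FILLED, PySem.List.pyGetD, c0, c1, c2, c3, c4, c5, c6, c7]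
  · have c0 : (0:Int) ≤ p := by omega
    have c1 : (32:Int) ≤ p := by omega
    have c2 : (64:Int) ≤ p := by omega
    have c3 : (96:Int) ≤ p := by omega
    have c4 : ¬ ((128:Int) ≤ p) := by omega
    have c5 : ¬ ((160:Int) ≤ p) := by omega
    have c6 : ¬ ((191:Int) ≤ p) := by omega
    have c7 : ¬ ((224:Int) ≤ p) := by omega
    simp [pixel_to_char, charFor, pixelLoop, bsLoop, THRESHOLD, CHARACTER, CHARACTER_FILLED, PySem.List.pyGetD, c0, c1, c2, c3, c4, c5, c6, c7]
  · have c0 : (0:Int) ≤ p := by omega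
    have c1 : (32:Int) ≤ p := by omega
    have c2 : (64:Int) ≤ p := by omega
    have c3 : (96:Int) ≤ p := by omega
    have c4 : (128:Int) ≤ p := by omega
    have c5 : ¬ ((160:Int) ≤ p) := by omega
    have c6 : ¬ ((191:Int) ≤ p) := by omega
    have c7 : ¬ ((224:Int) ≤ p) := by omega
    simp [pixel_to_char, charFor, pixelLoop, bsLoop, THRESHOLD, CHARACTER, CHARACTER_FILLED, PySem.List.pyGetD, c0, c1, c2, c3, c4, c5, c6, c7]
  · have c0 : (0:Int) ≤ p := by omega
    have c1 : (32:Int) ≤ p := by omega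
    have c2 : (64:Int) ≤ p := by omega
    have c3 : (96:Int) ≤ p := by omega
    have c4 : (128:Int) ≤ p := by omega
    have c5 : (160:Int) ≤ p := by omega
    have c6 : ¬ ((191:Int) ≤ p) := by omega
    have c7 : ¬ ((224:Int) ≤ p) := by omega
    simp [pixel_to_char, charFor, pixelLoop, bsLoop, THRESHOLD, CHARACTER, CHARACTER_FILLED, PySem.List.pyGetD, c0, c1, c2, c3, c4, c5, c6, c7]
  · have c0 : (0:Int) ≤ p := by omega
    have c1 : (32:Int) ≤ p := by omega
    have c2 : (64:Int) ≤ p := by omega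
    have c3 : (96:Int) ≤ p := by omega
    have c4 : (128:Int) ≤ p := by omega
    have c5 : (160:Int) ≤ p := by omega
    have c6 : (191:Int) ≤ p := by omega
    have c7 : ¬ ((224:Int) ≤ p) := by omega
    simp [pixel_to_char, charFor, pixelLoop, bsLoop, THRESHOLD, CHARACTER, CHARACTER_FILLED, PySem.List.pyGetD, c0, c1, c2, c3, c4, c5, c6, c7]
  · have c0 : (0:Int) ≤ p := by omega
    have c1 : (32:Int) ≤ p := by omega
    have c2 : (64:Int) ≤ p := by omega
    have c3 : (96:Int) ≤ p := by omega
    have c4 : (128:Int) ≤ p := by omega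
    have c5 : (160:Int) ≤ p := by omega
    have c6 : (191:Int) ≤ p := by omega
    have c7 : (224:Int) ≤ p := by omega
    simp [pixel_to_char, charFor, pixelLoop, bsLoop, THRESHOLD, CHARACTER, CHARACTER_FILLED, PySem.List.pyGetD, c0, c1, c2, c3, c4, c5, c6, c7]

lemma pchar_no_nl (p : Int) (mode : String) : '\n' ∉ pixel_to_char p mode := by
  rcases (by omega : p < 0 ∨ (0 ≤ p ∧ p < 32) ∨ (32 ≤ p ∧ p < 64) ∨ (64 ≤ p ∧ p < 96) ∨ (96 ≤ p ∧ p < 128) ∨ (128 ≤ p ∧ p < 160) ∨ (160 ≤ p ∧ p < 191) ∨ (191 ≤ p ∧ p < 224) ∨ 224 ≤ p) with h|h|h|h|h|h|h|h|h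
  · have c0 : ¬ ((0:Int) ≤ p) := by omega
    have c1 : ¬ ((32:Int) ≤ p) := by omega
    have c2 : ¬ ((64:Int) ≤ p) := by omega
    have c3 : ¬ ((96:Int) ≤ p) := by omega
    have c4 : ¬ ((128:Int) ≤ p) := by omega
    have c5 : ¬ ((160:Int) ≤ p) := by omega
    have c6 : ¬ ((191:Int) ≤ p) := by omega
    have c7 : ¬ ((224:Int) ≤ p) := by omega
    simp [pixel_to_char, pixelLoop, THRESHOLD, PySem.List.pyGetD, c0, c1, c2, c3, c4, c5, c6, c7]
    try (split_ifs <;> decide)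
  · have c0 : (0:Int) ≤ p := by omega
    have c1 : ¬ ((32:Int) ≤ p) := by omega
    have c2 : ¬ ((64:Int) ≤ p) := by omega
    have c3 : ¬ ((96:Int) ≤ p) := by omega
    have c4 : ¬ ((128:Int) ≤ p) := by omega
    have c5 : ¬ ((160:Int) ≤ p) := by omega
    have c6 : ¬ ((191:Int) ≤ p) := by omega
    have c7 : ¬ ((224:Int) ≤ p) := by omega
    simp [pixel_to_char, pixelLoop, THRESHOLD, PySem.List.pyGetD, c0, c1, c2, c3, c4, c5, c6, c7]
    try (split_ifs <;> decide)
  · have c0 : (0:Int) ≤ p := by omega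
    have c1 : (32:Int) ≤ p := by omega
    have c2 : ¬ ((64:Int) ≤ p) := by omega
    have c3 : ¬ ((96:Int) ≤ p) := by omega
    have c4 : ¬ ((128:Int) ≤ p) := by omega
    have c5 : ¬ ((160:Int) ≤ p) := by omega
    have c6 : ¬ ((191:Int) ≤ p) := by omega
    have c7 : ¬ ((224:Int) ≤ p) := by omega
    simp [pixel_to_char, pixelLoop, THRESHOLD, PySem.List.pyGetD, c0, c1, c2, c3, c4, c5, c6, c7]
    try (split_ifs <;> decide)
  · have c0 : (0:Int) ≤ p := by omega
    have c1 : (32:Int) ≤ p := by omega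
    have c2 : (64:Int) ≤ p := by omega
    have c3 : ¬ ((96:Int) ≤ p) := by omega
    have c4 : ¬ ((128:Int) ≤ p) := by omega
    have c5 : ¬ ((160:Int) ≤ p) := by omega
    have c6 : ¬ ((191:Int) ≤ p) := by omega
    have c7 : ¬ ((224:Int) ≤ p) := by omega
    simp [pixel_to_char, pixelLoop, THRESHOLD, PySem.List.pyGetD, c0, c1, c2, c3, c4, c5, c6, c7]
    try (split_ifs <;> decide)
  · have c0 : (0:Int) ≤ p := by omega
    have c1 : (32:Int) ≤ p := by omega
    have c2 : (64:Int) ≤ p := by omega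
    have c3 : (96:Int) ≤ p := by omega
    have c4 : ¬ ((128:Int) ≤ p) := by omega
    have c5 : ¬ ((160:Int) ≤ p) := by omega
    have c6 : ¬ ((191:Int) ≤ p) := by omega
    have c7 : ¬ ((224:Int) ≤ p) := by omega
    simp [pixel_to_char, pixelLoop, THRESHOLD, PySem.List.pyGetD, c0, c1, c2, c3, c4, c5, c6, c7]
    try (split_ifs <;> decide)
  · have c0 : (0:Int) ≤ p := by omega
    have c1 : (32:Int) ≤ p := by omega
    have c2 : (64:Int) ≤ p := by omega
    have c3 : (96:Int) ≤ p := by omega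
    have c4 : (128:Int) ≤ p := by omega
    have c5 : ¬ ((160:Int) ≤ p) := by omega
    have c6 : ¬ ((191:Int) ≤ p) := by omega
    have c7 : ¬ ((224:Int) ≤ p) := by omega
    simp [pixel_to_char, pixelLoop, THRESHOLD, PySem.List.pyGetD, c0, c1, c2, c3, c4, c5, c6, c7]
    try (split_ifs <;> decide)
  · have c0 : (0:Int) ≤ p := by omega
    have c1 : (32:Int) ≤ p := by omega
    have c2 : (64:Int) ≤ p := by omega
    have c3 : (96:Int) ≤ p := by omega
    have c4 : (128:Int) ≤ p := by omega
    have c5 : (160:Int) ≤ p := by omega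
    have c6 : ¬ ((191:Int) ≤ p) := by omega
    have c7 : ¬ ((224:Int) ≤ p) := by omega
    simp [pixel_to_char, pixelLoop, THRESHOLD, PySem.List.pyGetD, c0, c1, c2, c3, c4, c5, c6, c7]
    try (split_ifs <;> decide)
  · have c0 : (0:Int) ≤ p := by omega
    have c1 : (32:Int) ≤ p := by omega
    have c2 : (64:Int) ≤ p := by omega
    have c3 : (96:Int) ≤ p := by omega
    have c4 : (128:Int) ≤ p := by omega
    have c5 : (160:Int) ≤ p := by omega
    have c6 : (191:Int) ≤ p := by omega
    have c7 : ¬ ((224:Int) ≤ p) := by omega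
    simp [pixel_to_char, pixelLoop, THRESHOLD, PySem.List.pyGetD, c0, c1, c2, c3, c4, c5, c6, c7]
    try (split_ifs <;> decide)
  · have c0 : (0:Int) ≤ p := by omega
    have c1 : (32:Int) ≤ p := by omega
    have c2 : (64:Int) ≤ p := by omega
    have c3 : (96:Int) ≤ p := by omega
    have c4 : (128:Int) ≤ p := by omega
    have c5 : (160:Int) ≤ p := by omega
    have c6 : (191:Int) ≤ p := by omega
    have c7 : (224:Int) ≤ p := by omega
    simp [pixel_to_char, pixelLoop, THRESHOLD, PySem.List.pyGetD, c0, c1, c2, c3, c4, c5, c6, c7]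
    try (split_ifs <;> decide)

-- rows joined each with a trailing newline: the string A builds
def rowsJoin (rows : List (List Char)) : List Char := (rows.map (· ++ ['\n'])).flatten

lemma go_step (r t cur : List Char) (acc : List (List Char)) (hr : '\n' ∉ r) (fuel : Nat)
    (hf : r.length < fuel) :
    PySem.Chars.splitOn.go ['\n'] fuel (r ++ '\n' :: t) cur acc =
      PySem.Chars.splitOn.go ['\n'] (fuel - (r.length + 1)) t [] ((cur.reverse ++ r) :: acc) := by
  induction r generalizing fuel cur with
  | nil =>
    cases fuel with
    | zero => omega
    | succ f => simp [PySem.Chars.splitOn.go, List.isPrefixOf]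
  | cons c rest ih =>
    cases fuel with
    | zero => simp at hf
    | succ f =>
      have hc : c ≠ '\n' := by simp at hr; tauto
      have hrest : '\n' ∉ rest := by simp at hr; tauto
      have hf' : rest.length < f := by simp at hf; omega
      simp only [List.cons_append, PySem.Chars.splitOn.go]
      rw [if_neg (by simp [List.isPrefixOf, hc.symm])]
      rw [ih (c :: cur) hrest f hf']
      have harith : f + 1 - ((c :: rest).length + 1) = f - (rest.length + 1) := by
        simp only [List.length_cons]; omega
      rw [harith]
      simp

lemma go_rowsJoin (rows : List (List Char)) (hr : ∀ r ∈ rows, '\n' ∉ r) (fuel : Nat)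
    (acc : List (List Char)) (hf : (rowsJoin rows).length ≤ fuel) :
    PySem.Chars.splitOn.go ['\n'] fuel (rowsJoin rows) [] acc = acc.reverse ++ rows ++ [[]] := by
  induction rows generalizing fuel acc with
  | nil => cases fuel <;> simp [PySem.Chars.splitOn.go, rowsJoin]
  | cons r rs ih =>
    have hjoin : rowsJoin (r :: rs) = r ++ '\n' :: rowsJoin rs := by simp [rowsJoin]
    have hlen : (rowsJoin (r :: rs)).length = r.length + 1 + (rowsJoin rs).length := by
      rw [hjoin]; simp only [List.length_append, List.length_cons]; omega
    rw [hjoin, go_step r (rowsJoin rs) [] acc (hr r (by simp)) fuel (by omega)]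
    rw [ih (fun x hx => hr x (by simp [hx])) _ _ (by omega)]
    simp

lemma splitOn_rowsJoin (rows : List (List Char)) (hr : ∀ r ∈ rows, '\n' ∉ r) :
    PySem.Chars.splitOn (rowsJoin rows) ['\n'] = rows ++ [[]] := by
  unfold PySem.Chars.splitOn
  rw [go_rowsJoin rows hr _ [] (by omega)]
  simp

lemma a_fold (image : List (List Int)) (mode : String) (acc : List Char) :
    image.foldl (fun out row =>
        (row.foldl (fun o p => o ++ pixel_to_char p mode) out) ++ ['\n']) acc =
      acc ++ rowsJoin (image.map (fun row => row.flatMap (fun p => pixel_to_char p mode))) := by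
  induction image generalizing acc with
  | nil => simp [rowsJoin]
  | cons row rest ih =>
    simp only [List.foldl_cons, PySem.List.foldl_append_eq_flatMap, ih]
    simp [rowsJoin, Function.comp_def]

lemma join_nil_flatten : ∀ (xss : List (List Char)), PySem.Chars.join [] xss = xss.flatten
  | [] => by simp [PySem.Chars.join_nil]
  | [x] => by simp [PySem.Chars.join_singleton]
  | x :: y :: ys => by
    rw [PySem.Chars.join_cons_cons, join_nil_flatten (y :: ys)]
    simp

-- ===== VERDICT (by name: the statement is the Claim_ definition above) =====
theorem img_to_ascii_spec : Claim_equal_img_to_ascii := by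
  intro image mode _
  simp only [Spec_img_to_ascii, img_to_ascii, img_to_ascii_alt]
  rw [a_fold image mode []]
  rw [List.nil_append,
    splitOn_rowsJoin _ (by
      intro r hrr
      simp only [List.mem_map] at hrr
      obtain ⟨row, _, rfl⟩ := hrr
      intro hmem
      rw [List.mem_flatMap] at hmem
      obtain ⟨p, _, hp⟩ := hmem
      exact pchar_no_nl p mode hp)]
  simp only [List.map_append, List.map_map, List.map_cons, List.map_nil]
  congr 1
  apply List.map_congr_left
  intro row _
  simp [Function.comp, join_nil_flatten, List.flatMap_def, pchar_eq]
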